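-- pv_equiv track=rewrite | github.com/jiminkyung/Algorithm | Programmers/Lv2/전력망을 둘로 나누기.py | dfs
-- ===== SOURCE A (Python) =====
-- def dfs(graph, start, visited):
--     """
--     DFS 탐색을 수행하여 연결된 송전탑의 개수를 세는 함수
--
--     graph: 그래프 정보를 담은 2차원 리스트
--     start: 탐색을 시작할 송전탑의 번호
--     visited: 송전탑의 방문 여부를 나타내는 리스트, visited[i]는 i번 송전탑의 방문 여부를 나타내며 초기값은 모두 False로 설정됨
--
--     DFS 탐색을 사용하여 연결된 송전탑 탐색
--     스택을 사용하여 DFS 구현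
--     방문한 송전탑의 개수를 count 변수에 저장하여 반환
--     """
--     stack = [start]
--     count = 0
--     while stack:
--         node = stack.pop()
--         if not visited[node]:
--             visited[node] = True
--             count += 1
--             for neighbor in graph[node]:
--                 if not visited[neighbor]:
--                     stack.append(neighbor)
--     return count
-- ===== SOURCE B (Python) =====
-- def dfs(graph, start, visited):
--     """Recursive DFS: count (and mark) towers connected to start (same in-place
--     marking of `visited` as the original)."""
--     if visited[start]:
--         return 0
--     visited[start] = True
--     count = 1
--     for neighbor in graph[start]:
--         count += dfs(graph, neighbor, visited)
--     return count
-- ===== Notes on version B (the rewrite author's own statement) =====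
-- stated objective: idiomatic
-- what changed: The explicit stack/while loop is replaced by the textbook recursive DFS (recursion on the graph structure, neighbors processed in forward order); same reachable-node count and the same in-place marking of visited.
-- outside the precondition, e.g. on dfs([[], [99]], 0, [False, False]): A returns 1, B returns 1; on dfs([[], []], 0, [False]): A returns 1, B returns 1
import Mathlib
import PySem

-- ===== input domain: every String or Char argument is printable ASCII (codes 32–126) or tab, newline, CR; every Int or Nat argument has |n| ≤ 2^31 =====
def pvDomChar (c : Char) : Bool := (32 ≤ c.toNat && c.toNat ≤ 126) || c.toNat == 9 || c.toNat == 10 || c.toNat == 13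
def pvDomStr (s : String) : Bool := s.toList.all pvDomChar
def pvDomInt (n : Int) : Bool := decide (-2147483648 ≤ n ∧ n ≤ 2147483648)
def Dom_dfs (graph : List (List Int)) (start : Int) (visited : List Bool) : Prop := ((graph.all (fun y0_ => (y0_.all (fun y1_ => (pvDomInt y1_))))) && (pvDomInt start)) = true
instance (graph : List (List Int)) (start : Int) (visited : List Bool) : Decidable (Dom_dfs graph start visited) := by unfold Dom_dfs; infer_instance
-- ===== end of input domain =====

-- B replaces the explicit stack/while DFS by the textbook recursive DFS (idiomatic
-- decomposition; same count). Python A and B both mutate `visited` in place in the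
-- same way (they mark exactly the counted towers); the theorems are about the count.

-- termination helper, cited by the ports' decreasing_by
theorem pvCountFalseSet (b : List Bool) (x : Int)
    (h : PySem.List.pyGet? b x = some false) :
    (PySem.List.pySetD b x true).count false < b.count false := by
  unfold PySem.List.pyGet? at h
  unfold PySem.List.pySetD PySem.List.pySet?
  cases hk : PySem.List.pyIdx? b.length x with
  | none => simp [hk] at h
  | some k =>
    simp only [hk, Option.bind_some] at h
    have hklt : k < b.length := by
      by_contra hge
      rw [List.getElem?_eq_none (by omega)] at h
      simp at h
    rw [List.getElem?_eq_getElem hklt] at h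
    have hbk : b[k] = false := Option.some.inj h
    simp only [Option.map_some, Option.getD_some]
    clear h hk
    induction b generalizing k with
    | nil => simp at hklt
    | cons a t ih =>
      cases k with
      | zero => subst hbk; simp [List.set]
      | succ m =>
        simp only [List.set, List.count_cons]
        have := ih m (by simpa using hklt) (by simpa using hbk)
        omega

-- ===== PORT A =====
-- A's while loop over an explicit stack (stack.pop() pops the LAST element).
-- On an out-of-range index Python raises IndexError (excluded by Pre_); the
-- port just stops there, returning the count so far.
def dfsLoopA (g : List (List Int)) (stack : List Int) (b : List Bool) (c : Int) : Int :=
  if hne : stack = [] then c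
  else
    let node := stack.getLast hne
    let rest := stack.dropLast
    match h : PySem.List.pyGet? b node with
    | none => c
    | some true => dfsLoopA g rest b c
    | some false =>
      let b' := PySem.List.pySetD b node true
      let row := (PySem.List.pyGet? g node).getD []
      let pushed := row.filter (fun nb => (PySem.List.pyGet? b' nb).getD true == false)
      dfsLoopA g (rest ++ pushed) b' (c + 1)
termination_by (b.count false, stack.length)
decreasing_by
  · exact Prod.Lex.right _ (by
      have : stack.dropLast.length < stack.length := by
        cases stack with
        | nil => exact absurd rfl hne
        | cons a t => simp
      simpa using this)
  · exact Prod.Lex.left _ _ (pvCountFalseSet b node h)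

def dfs (graph : List (List Int)) (start : Int) (visited : List Bool) : Int :=
  dfsLoopA graph [start] visited 0

-- ===== PORT B =====
-- Recursive DFS; the visited list is threaded through the recursion (Python
-- mutates it in place).  The subtype carries the two facts the termination
-- argument needs: the visited list keeps its length and never loses a mark.
mutual
def dfsB (g : List (List Int)) (x : Int) (b : List Bool) :
    {p : Int × List Bool // p.2.length = b.length ∧ p.2.count false ≤ b.count false} :=
  match h : PySem.List.pyGet? b x with
  | none => ⟨(0, b), rfl, Nat.le_refl _⟩
  | some true => ⟨(0, b), rfl, Nat.le_refl _⟩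
  | some false =>
    let b' := PySem.List.pySetD b x true
    let r := dfsBLoop g ((PySem.List.pyGet? g x).getD []) 1 b'
    ⟨r.val, by
      refine ⟨r.property.1.trans ?_, le_trans r.property.2 (le_of_lt (pvCountFalseSet b x h))⟩
      exact PySem.List.length_pySetD b x true⟩
termination_by (b.count false, 0)
decreasing_by
  exact Prod.Lex.left _ _ (pvCountFalseSet b x h)
def dfsBLoop (g : List (List Int)) (xs : List Int) (c : Int) (b : List Bool) :
    {p : Int × List Bool // p.2.length = b.length ∧ p.2.count false ≤ b.count false} :=
  match xs with
  | [] => ⟨(c, b), rfl, Nat.le_refl _⟩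
  | x :: xs =>
    match dfsB g x b with
    | ⟨(d, b2), hp⟩ =>
      let r2 := dfsBLoop g xs (c + d) b2
      ⟨r2.val, r2.property.1.trans hp.1, le_trans r2.property.2 hp.2⟩
termination_by (b.count false, xs.length + 1)
decreasing_by
  · exact Prod.Lex.right _ (by omega)
  · rcases Nat.lt_or_eq_of_le hp.2 with hlt | heq
    · exact Prod.Lex.left _ _ hlt
    · rw [heq]; exact Prod.Lex.right _ (by simp)
end

def dfs_alt (graph : List (List Int)) (start : Int) (visited : List Bool) : Int :=
  (dfsB graph start visited).val.1

-- Python index resolution (the value pyIdx? returns on a valid index; used by Pre_)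
def pvIx (n : Nat) (x : Int) : Nat := (PySem.List.pyIdx? n x).getD 0

-- ===== PRECONDITION & SPEC =====
-- Pre_ = start is a valid index (Python's negative indices wrap), and either
-- visited[start] is already True (the search stops at once) or graph and visited
-- have the same length and every adjacency entry lies in [-n, n), so every index
-- the search may resolve is valid.  This still excludes some inputs on which A
-- happens to return because an out-of-range entry or a length mismatch sits in a
-- row the search never visits; see the cites in the claim.
def Pre_dfs (graph : List (List Int)) (start : Int) (visited : List Bool) : Prop :=
  PySem.Raise.InRange visited.length start ∧
    (visited.getD (pvIx visited.length start) true = true ∨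
      (graph.length = visited.length ∧
        ∀ row ∈ graph, ∀ x ∈ row, PySem.Raise.InRange visited.length x))
instance (graph : List (List Int)) (start : Int) (visited : List Bool) : Decidable (Pre_dfs graph start visited) := by
  unfold Pre_dfs PySem.Raise.InRange; infer_instance

def pvWitness_dfs : List (List Int) × Int × List Bool := ([[1], [0, -2]], 0, [false, false])

def Spec_dfs (graph : List (List Int)) (start : Int) (visited : List Bool) (out : Int) : Prop := out = dfs_alt graph start visited
instance (graph : List (List Int)) (start : Int) (visited : List Bool) (out : Int) : Decidable (Spec_dfs graph start visited out) := by unfold Spec_dfs; infer_instance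

-- ===== CLAIM (what is proved, stated in full; the proofs are below) =====
def Claim_equal_dfs : Prop := ∀ (graph : List (List Int)) (start : Int) (visited : List Bool), Dom_dfs graph start visited → Pre_dfs graph start visited → Spec_dfs graph start visited (dfs graph start visited)

-- ===== LEMMAS AND PROOFS =====

theorem pvIdx_eq (n : Nat) (x : Int) (h : PySem.Raise.InRange n x) :
    PySem.List.pyIdx? n x = some (pvIx n x) ∧ pvIx n x < n := by
  obtain ⟨h1, h2⟩ := h
  unfold pvIx PySem.List.pyIdx?
  split_ifs with h3 h4 <;> simp_all <;> omega

theorem pvGet_eq {α : Type} (l : List α) (d : α) (x : Int) (h : PySem.Raise.InRange l.length x) :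
    PySem.List.pyGet? l x = some (l.getD (pvIx l.length x) d) := by
  obtain ⟨hs, hlt⟩ := pvIdx_eq l.length x h
  unfold PySem.List.pyGet?
  rw [hs, List.getD_eq_getElem?_getD, List.getElem?_eq_getElem hlt]
  simp

theorem pvSet_eq (b : List Bool) (x : Int) (h : PySem.Raise.InRange b.length x) :
    PySem.List.pySetD b x true = b.set (pvIx b.length x) true := by
  obtain ⟨hs, _⟩ := pvIdx_eq b.length x h
  unfold PySem.List.pySetD PySem.List.pySet?
  rw [hs]; rfl

theorem pvGetD_set_self (b : List Bool) (k : Nat) (hk : k < b.length) :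
    (b.set k true).getD k true = true := by
  rw [List.getD_eq_getElem?_getD, List.getElem?_set_self hk]; rfl

theorem pvGetD_set_ne (b : List Bool) (v : Bool) (k i : Nat) (h : i ≠ k) :
    (b.set k v).getD i true = b.getD i true := by
  rw [List.getD_eq_getElem?_getD, List.getD_eq_getElem?_getD,
    List.getElem?_set_ne (Ne.symm h)]

theorem pvGetD_lt (b : List Bool) (i : Nat) (h : b.getD i true = false) : i < b.length := by
  by_contra hge
  rw [List.getD_eq_default _ _ (by omega)] at h
  exact Bool.noConfusion h

-- reachability from node u through currently-unvisited nodes (node = resolved index)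
inductive pvReach (g : List (List Int)) (b : List Bool) : Nat → Nat → Prop
  | refl (u : Nat) : b.getD u true = false → pvReach g b u u
  | tail {u v : Nat} (x : Int) : pvReach g b u v → x ∈ g.getD v [] →
      b.getD (pvIx b.length x) true = false → pvReach g b u (pvIx b.length x)

-- the set A's loop still has to count: nodes reachable from some (resolved) source in srcs
def pvRS (g : List (List Int)) (b : List Bool) (srcs : List Int) : Set Nat :=
  {w | ∃ s ∈ srcs, pvReach g b (pvIx b.length s) w}

theorem pvReach_src (g : List (List Int)) (b : List Bool) {u w : Nat}
    (h : pvReach g b u w) : b.getD u true = false := by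
  induction h with
  | refl hu => exact hu
  | tail x hr hx hw ih => exact ih

theorem pvReach_tgt (g : List (List Int)) (b : List Bool) {u w : Nat}
    (h : pvReach g b u w) : b.getD w true = false := by
  cases h with
  | refl hu => exact hu
  | tail x hr hx hw => exact hw

theorem pvReach_trans (g : List (List Int)) (b : List Bool) {u v w : Nat}
    (h1 : pvReach g b u v) (h2 : pvReach g b v w) : pvReach g b u w := by
  induction h2 with
  | refl _ => exact h1
  | tail x hr hx hw ih => exact pvReach.tail x ih hx hw

theorem pvReach_mono (g : List (List Int)) (b b2 : List Bool)
    (hlen : b2.length = b.length)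
    (himp : ∀ i, b2.getD i true = false → b.getD i true = false)
    {u w : Nat} (h : pvReach g b2 u w) : pvReach g b u w := by
  induction h with
  | refl hu => exact pvReach.refl _ (himp _ hu)
  | tail x hr hx hw ih =>
      rw [hlen] at hw ⊢
      exact pvReach.tail x ih hx (himp _ hw)

theorem pvRS_lt (g : List (List Int)) (b : List Bool) (srcs : List Int) {w : Nat}
    (h : w ∈ pvRS g b srcs) : w < b.length := by
  obtain ⟨s, _, hr⟩ := h
  exact pvGetD_lt b w (pvReach_tgt g b hr)

theorem pvRS_finite (g : List (List Int)) (b : List Bool) (srcs : List Int) :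
    (pvRS g b srcs).Finite :=
  (Set.finite_Iio b.length).subset (fun _ hw => pvRS_lt g b srcs hw)

theorem pvRS_congr (g : List (List Int)) (b : List Bool) (l1 l2 : List Int)
    (h : ∀ x, x ∈ l1 ↔ x ∈ l2) : pvRS g b l1 = pvRS g b l2 := by
  ext w; unfold pvRS; simp only [Set.mem_setOf_eq]
  constructor
  · rintro ⟨s, hs, hr⟩; exact ⟨s, (h s).mp hs, hr⟩
  · rintro ⟨s, hs, hr⟩; exact ⟨s, (h s).mpr hs, hr⟩

theorem pvRS_nil (g : List (List Int)) (b : List Bool) : pvRS g b [] = ∅ := by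
  ext w; simp [pvRS]

theorem pvRS_cons (g : List (List Int)) (b : List Bool) (s : Int) (t : List Int) :
    pvRS g b (s :: t) = pvRS g b [s] ∪ pvRS g b t := by
  ext w; simp only [pvRS, Set.mem_setOf_eq, Set.mem_union, List.mem_cons, List.mem_singleton]
  constructor
  · rintro ⟨x, hx | hx, hr⟩
    · exact Or.inl ⟨x, Or.inl hx, hr⟩
    · exact Or.inr ⟨x, hx, hr⟩
  · rintro (⟨x, hx, hr⟩ | ⟨x, hx, hr⟩)
    · rcases hx with hx | hx
      · exact ⟨x, Or.inl hx, hr⟩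
      · cases hx
    · exact ⟨x, Or.inr hx, hr⟩

theorem pvRS_src_vis (g : List (List Int)) (b : List Bool) (s : Int)
    (h : b.getD (pvIx b.length s) true = true) : pvRS g b [s] = ∅ := by
  ext w
  simp only [pvRS, Set.mem_setOf_eq, List.mem_singleton, Set.mem_empty_iff_false, iff_false]
  rintro ⟨t, ht, hr⟩
  subst ht
  rw [pvReach_src g b hr] at h
  exact Bool.noConfusion h

theorem pvSurgA_aux (g : List (List Int)) (b : List Bool) (i0 : Nat)
    (hi0 : i0 < b.length) {u w : Nat} (h : pvReach g b u w) :
    w = i0 ∨ pvReach g (b.set i0 true) u w ∨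
      ∃ x ∈ g.getD i0 [], pvReach g (b.set i0 true) (pvIx b.length x) w := by
  induction h with
  | refl hu =>
    by_cases he : u = i0
    · exact Or.inl he
    · exact Or.inr (Or.inl (pvReach.refl _ (by rw [pvGetD_set_ne b true i0 u he]; exact hu)))
  | @tail v' x hr hx hw ih =>
    by_cases he : pvIx b.length x = i0
    · exact Or.inl he
    · have hw' : (b.set i0 true).getD (pvIx b.length x) true = false := by
        rw [pvGetD_set_ne b true i0 _ he]; exact hw
      rcases ih with hv | hv | ⟨y, hy, hv⟩
      · refine Or.inr (Or.inr ⟨x, by rw [hv] at hx; exact hx, pvReach.refl _ hw'⟩)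
      · refine Or.inr (Or.inl ?_)
        have h2 := pvReach.tail (g := g) (b := b.set i0 true) x hv hx
          (by simpa [List.length_set] using hw')
        simpa [List.length_set] using h2
      · refine Or.inr (Or.inr ⟨y, hy, ?_⟩)
        have h2 := pvReach.tail (g := g) (b := b.set i0 true) x hv hx
          (by simpa [List.length_set] using hw')
        simpa [List.length_set] using h2

theorem pvSurgA_back (g : List (List Int)) (b : List Bool) (i0 : Nat)
    (hi0 : i0 < b.length) {u w : Nat}
    (h : pvReach g (b.set i0 true) u w) : pvReach g b u w :=
  pvReach_mono g b (b.set i0 true) (by simp) (fun i hi => by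
    by_cases he : i = i0
    · subst he; rw [pvGetD_set_self b i hi0] at hi; exact Bool.noConfusion hi
    · rw [pvGetD_set_ne b true i0 i he] at hi; exact hi) h

theorem pvRS_step (g : List (List Int)) (b : List Bool) (s : Int) (rest : List Int)
    (hs : b.getD (pvIx b.length s) true = false) :
    pvRS g b (s :: rest) =
      insert (pvIx b.length s)
        (pvRS g (b.set (pvIx b.length s) true) (g.getD (pvIx b.length s) [] ++ rest)) := by
  have hi0 : pvIx b.length s < b.length := pvGetD_lt b _ hs
  have hlen : (b.set (pvIx b.length s) true).length = b.length := by simp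
  ext w
  simp only [Set.mem_insert_iff]
  constructor
  · rintro ⟨t, ht, hr⟩
    rcases pvSurgA_aux g b (pvIx b.length s) hi0 hr with h1 | h1 | ⟨x, hx, h1⟩
    · exact Or.inl h1
    · rcases List.mem_cons.mp ht with ht | ht
      · subst ht
        have := pvReach_src g _ h1
        rw [pvGetD_set_self b _ hi0] at this
        exact Bool.noConfusion this
      · exact Or.inr ⟨t, List.mem_append.mpr (Or.inr ht), by rw [hlen]; exact h1⟩
    · exact Or.inr ⟨x, List.mem_append.mpr (Or.inl hx), by rw [hlen]; exact h1⟩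
  · rintro (h1 | ⟨x, hx, hr⟩)
    · subst h1
      exact ⟨s, List.mem_cons_self, pvReach.refl _ hs⟩
    · rw [hlen] at hr
      have hrb : pvReach g b (pvIx b.length x) w := pvSurgA_back g b _ hi0 hr
      rcases List.mem_append.mp hx with hx | hx
      · have hxunvis : b.getD (pvIx b.length x) true = false := by
          have hsrc := pvReach_src g _ hr
          by_cases he : pvIx b.length x = pvIx b.length s
          · rw [he, pvGetD_set_self b _ hi0] at hsrc; exact Bool.noConfusion hsrc
          · rw [pvGetD_set_ne b true _ _ he] at hsrc; exact hsrc
        have hstep : pvReach g b (pvIx b.length s) (pvIx b.length x) :=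
          pvReach.tail x (pvReach.refl _ hs) hx hxunvis
        exact ⟨s, List.mem_cons_self, pvReach_trans g b hstep hrb⟩
      · exact ⟨x, List.mem_cons_of_mem s hx, hrb⟩

theorem pvRS_set_notmem (g : List (List Int)) (b : List Bool) (i0 : Nat)
    (hi0 : i0 < b.length) (l : List Int) : i0 ∉ pvRS g (b.set i0 true) l := by
  rintro ⟨t, ht, hr⟩
  have := pvReach_tgt g _ hr
  rw [pvGetD_set_self b _ hi0] at this
  exact Bool.noConfusion this

theorem pvRS_filter (g : List (List Int)) (b : List Bool) (row rest : List Int) (p : Int → Bool)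
    (hp : ∀ x ∈ row, p x = false → b.getD (pvIx b.length x) true = true) :
    pvRS g b (row.filter p ++ rest) = pvRS g b (row ++ rest) := by
  ext w
  simp only [pvRS, Set.mem_setOf_eq, List.mem_append, List.mem_filter]
  constructor
  · rintro ⟨x, hx | hx, hr⟩
    · exact ⟨x, Or.inl hx.1, hr⟩
    · exact ⟨x, Or.inr hx, hr⟩
  · rintro ⟨x, hx | hx, hr⟩
    · cases hpx : p x with
      | false =>
        have := pvReach_src g b hr
        rw [hp x hx hpx] at this
        exact Bool.noConfusion this
      | true => exact ⟨x, Or.inl ⟨hx, hpx⟩, hr⟩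
    · exact ⟨x, Or.inr hx, hr⟩

theorem pvLoopA_eq (g : List (List Int)) :
    ∀ (stack : List Int) (b : List Bool) (c : Int),
      g.length = b.length →
      (∀ row ∈ g, ∀ x ∈ row, PySem.Raise.InRange b.length x) →
      (∀ s ∈ stack, PySem.Raise.InRange b.length s) →
      dfsLoopA g stack b c = c + ((pvRS g b stack).ncard : Int) := by
  intro stack b c
  induction stack, b, c using dfsLoopA.induct g with
  | case1 b c =>
    intro _ _ _
    rw [dfsLoopA, pvRS_nil]
    simp
  | case2 stack b c hne node h =>
    intro hg hrows hstk
    have hin := hstk _ (List.getLast_mem hne)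
    have h2 : PySem.List.pyGet? b (stack.getLast hne) = none := h
    rw [pvGet_eq b true _ hin] at h2
    simp at h2
  | case3 stack b c hne node rest h ih =>
    intro hg hrows hstk
    have hin := hstk _ (List.getLast_mem hne)
    have h2 : PySem.List.pyGet? b (stack.getLast hne) = some true := h
    rw [pvGet_eq b true _ hin] at h2
    have hvis : b.getD (pvIx b.length (stack.getLast hne)) true = true := Option.some.inj h2
    have hmem : ∀ x, x ∈ stack ↔ x ∈ stack.getLast hne :: stack.dropLast := by
      intro x
      conv_lhs => rw [← List.dropLast_concat_getLast hne]
      simp [List.mem_append, or_comm]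
    rw [dfsLoopA]
    rw [dif_neg hne]
    have hscrut : PySem.List.pyGet? b (stack.getLast hne) = some true := h
    simp only [letFun] at *
    split
    · rename_i heq
      rw [hscrut] at heq; simp at heq
    · rw [pvRS_congr g b stack _ hmem, pvRS_cons, pvRS_src_vis g b _ hvis, Set.empty_union]
      exact ih hg hrows (fun s hs => hstk s (List.mem_of_mem_dropLast hs))
    · rename_i heq
      rw [hscrut] at heq; simp at heq
  | case4 stack b c hne node rest h b' row pushed ih =>
    intro hg hrows hstk
    replace ih :
        g.length = (PySem.List.pySetD b (stack.getLast hne) true).length →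
        (∀ row ∈ g, ∀ x ∈ row, PySem.Raise.InRange (PySem.List.pySetD b (stack.getLast hne) true).length x) →
        (∀ s ∈ stack.dropLast ++ List.filter
            (fun nb => (PySem.List.pyGet? (PySem.List.pySetD b (stack.getLast hne) true) nb).getD true == false)
            ((PySem.List.pyGet? g (stack.getLast hne)).getD []),
          PySem.Raise.InRange (PySem.List.pySetD b (stack.getLast hne) true).length s) →
        dfsLoopA g
          (stack.dropLast ++ List.filter
            (fun nb => (PySem.List.pyGet? (PySem.List.pySetD b (stack.getLast hne) true) nb).getD true == false)
            ((PySem.List.pyGet? g (stack.getLast hne)).getD []))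
          (PySem.List.pySetD b (stack.getLast hne) true) (c + 1)
        = c + 1 + ((pvRS g (PySem.List.pySetD b (stack.getLast hne) true)
            (stack.dropLast ++ List.filter
              (fun nb => (PySem.List.pyGet? (PySem.List.pySetD b (stack.getLast hne) true) nb).getD true == false)
              ((PySem.List.pyGet? g (stack.getLast hne)).getD []))).ncard : Int) := ih
    have hin := hstk _ (List.getLast_mem hne)
    have hscrut : PySem.List.pyGet? b (stack.getLast hne) = some false := h
    have h2 := hscrut
    rw [pvGet_eq b true _ hin] at h2
    have hunvis : b.getD (pvIx b.length (stack.getLast hne)) true = false := Option.some.inj h2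
    have hi0 : pvIx b.length (stack.getLast hne) < b.length := pvGetD_lt b _ hunvis
    have hgin : PySem.Raise.InRange g.length (stack.getLast hne) := by rw [hg]; exact hin
    have hbset : PySem.List.pySetD b (stack.getLast hne) true
        = b.set (pvIx b.length (stack.getLast hne)) true := pvSet_eq b _ hin
    have hrowget : PySem.List.pyGet? g (stack.getLast hne)
        = some (g.getD (pvIx b.length (stack.getLast hne)) []) := by
      have := pvGet_eq g [] _ hgin
      rw [this]
      congr 2
      rw [hg]
    have hmem : ∀ x, x ∈ stack ↔ x ∈ stack.getLast hne :: stack.dropLast := by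
      intro x
      conv_lhs => rw [← List.dropLast_concat_getLast hne]
      simp [List.mem_append, or_comm]
    have hrowmem : g.getD (pvIx b.length (stack.getLast hne)) [] ∈ g := by
      have hlt : pvIx b.length (stack.getLast hne) < g.length := by rw [hg]; exact hi0
      rw [List.getD_eq_getElem?_getD, List.getElem?_eq_getElem hlt]
      exact List.getElem_mem _
    have hrowrange := hrows _ hrowmem
    have hlenset : (b.set (pvIx b.length (stack.getLast hne)) true).length = b.length := by simp
    rw [dfsLoopA]
    rw [dif_neg hne]
    simp only [letFun] at *
    split
    · rename_i heq; rw [hscrut] at heq; simp at heq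
    · rename_i heq; rw [hscrut] at heq; simp at heq
    · -- the marking step
      rw [ih (by rw [hbset, hlenset]; exact hg)
            (by rw [hbset]; intro r hr x hx; rw [hlenset]; exact hrows r hr x hx)
            (by
              intro s hs
              rw [hbset, hlenset]
              rcases List.mem_append.mp hs with hs | hs
              · exact hstk s (List.mem_of_mem_dropLast hs)
              · have := (List.mem_filter.mp hs).1
                rw [hrowget] at this
                exact hrowrange s this)]
      rw [hrowget, hbset]
      simp only [Option.getD_some]
      have efilter : pvRS g (b.set (pvIx b.length (stack.getLast hne)) true)
          ((List.filter (fun nb => (PySem.List.pyGet? (b.set (pvIx b.length (stack.getLast hne)) true) nb).getD true == false) (g.getD (pvIx b.length (stack.getLast hne)) [])) ++ stack.dropLast)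
          = pvRS g (b.set (pvIx b.length (stack.getLast hne)) true)
            (g.getD (pvIx b.length (stack.getLast hne)) [] ++ stack.dropLast) := by
        apply pvRS_filter
        intro x hx hpx
        have hxin : PySem.Raise.InRange (b.set (pvIx b.length (stack.getLast hne)) true).length x := by
          rw [hlenset]; exact hrowrange x hx
        rw [pvGet_eq _ true x hxin] at hpx
        simp only [Option.getD_some] at hpx
        cases hv : (b.set (pvIx b.length (stack.getLast hne)) true).getD
            (pvIx (b.set (pvIx b.length (stack.getLast hne)) true).length x) true with
        | true => rfl
        | false => rw [hv] at hpx; simp at hpx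
      have ecomm : pvRS g (b.set (pvIx b.length (stack.getLast hne)) true)
          (stack.dropLast ++ (List.filter (fun nb => (PySem.List.pyGet? (b.set (pvIx b.length (stack.getLast hne)) true) nb).getD true == false) (g.getD (pvIx b.length (stack.getLast hne)) [])))
          = pvRS g (b.set (pvIx b.length (stack.getLast hne)) true)
            ((List.filter (fun nb => (PySem.List.pyGet? (b.set (pvIx b.length (stack.getLast hne)) true) nb).getD true == false) (g.getD (pvIx b.length (stack.getLast hne)) [])) ++ stack.dropLast) := by
        apply pvRS_congr
        intro x
        simp only [List.mem_append]
        tauto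
      rw [ecomm, efilter]
      have e1 : pvRS g b stack
          = insert (pvIx b.length (stack.getLast hne))
              (pvRS g (b.set (pvIx b.length (stack.getLast hne)) true)
                (g.getD (pvIx b.length (stack.getLast hne)) [] ++ stack.dropLast)) := by
        rw [pvRS_congr g b stack _ hmem]
        exact pvRS_step g b _ _ hunvis
      rw [e1, Set.ncard_insert_of_notMem (pvRS_set_notmem g b _ hi0 _) (pvRS_finite g _ _)]
      push_cast
      ring

-- b2 is b with exactly the nodes of S newly marked visited
def pvVX (b2 b : List Bool) (S : Set Nat) : Prop :=
  b2.length = b.length ∧ ∀ i, (b2.getD i true = false ↔ (b.getD i true = false ∧ i ∉ S))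

theorem pvSurgB_aux (g : List (List Int)) (b b2 : List Bool) (l : List Int)
    (hlen : b2.length = b.length)
    (hiff : ∀ i, (b2.getD i true = false ↔ (b.getD i true = false ∧ i ∉ pvRS g b l)))
    {u w : Nat} (h : pvReach g b u w) : w ∉ pvRS g b l → pvReach g b2 u w := by
  induction h with
  | refl hu => exact fun hw => pvReach.refl _ ((hiff _).mpr ⟨hu, hw⟩)
  | @tail v' x hr hx hw2 ih =>
    intro hnot
    by_cases hv : v' ∈ pvRS g b l
    · exfalso
      obtain ⟨t, ht, hrt⟩ := hv
      exact hnot ⟨t, ht, pvReach.tail x hrt hx hw2⟩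
    · have hb2 : b2.getD (pvIx b.length x) true = false := (hiff _).mpr ⟨hw2, hnot⟩
      have h2 := pvReach.tail (g := g) (b := b2) x (ih hv) hx (by rw [hlen]; exact hb2)
      rw [hlen] at h2
      exact h2

theorem pvRS_VX (g : List (List Int)) (b b2 : List Bool) (l xs : List Int)
    (hvx : pvVX b2 b (pvRS g b l)) :
    pvRS g b2 xs = pvRS g b xs \ pvRS g b l := by
  obtain ⟨hlen, hiff⟩ := hvx
  ext w
  simp only [pvRS, Set.mem_setOf_eq, Set.mem_diff]
  constructor
  · rintro ⟨s, hs, hr⟩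
    have h1 := pvReach_mono g b b2 hlen (fun i hi => ((hiff i).mp hi).1) hr
    rw [hlen] at h1
    exact ⟨⟨s, hs, h1⟩, ((hiff w).mp (pvReach_tgt g b2 hr)).2⟩
  · rintro ⟨⟨s, hs, hr⟩, hw⟩
    refine ⟨s, hs, ?_⟩
    rw [show pvIx b2.length s = pvIx b.length s from by rw [hlen]]
    exact pvSurgB_aux g b b2 l hlen hiff hr hw

theorem pvRS_split (g : List (List Int)) (b : List Bool) (x : Int) (xs : List Int) :
    ((pvRS g b (x :: xs)).ncard : Int)
      = ((pvRS g b [x]).ncard : Int) + ((pvRS g b xs \ pvRS g b [x]).ncard : Int) := by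
  rw [pvRS_cons, ← Set.union_diff_self,
    Set.ncard_union_eq Set.disjoint_sdiff_right (pvRS_finite g b [x])
      ((pvRS_finite g b xs).diff)]
  push_cast
  ring

theorem pvSet_iff (b : List Bool) (i0 : Nat) (hi0 : i0 < b.length) :
    ∀ i, ((b.set i0 true).getD i true = false ↔ (b.getD i true = false ∧ i ≠ i0)) := by
  intro i
  by_cases he : i = i0
  · subst he; rw [pvGetD_set_self b i hi0]; simp
  · rw [pvGetD_set_ne b true i0 i he]; simp [he]

theorem pvB_main (g : List (List Int)) : ∀ N : Nat,
    (∀ b : List Bool, b.count false ≤ N →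
      g.length = b.length →
      (∀ row ∈ g, ∀ x ∈ row, PySem.Raise.InRange b.length x) →
      ∀ x : Int, PySem.Raise.InRange b.length x →
        (dfsB g x b).val.1 = ((pvRS g b [x]).ncard : Int) ∧
        pvVX (dfsB g x b).val.2 b (pvRS g b [x]))
    ∧
    (∀ xs : List Int, ∀ b : List Bool, ∀ c : Int, b.count false ≤ N →
      g.length = b.length →
      (∀ row ∈ g, ∀ x ∈ row, PySem.Raise.InRange b.length x) →
      (∀ x ∈ xs, PySem.Raise.InRange b.length x) →
        (dfsBLoop g xs c b).val.1 = c + ((pvRS g b xs).ncard : Int) ∧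
        pvVX (dfsBLoop g xs c b).val.2 b (pvRS g b xs)) := by
  intro N
  induction N using Nat.strong_induction_on with
  | _ N ihN =>
  have hP : ∀ b : List Bool, b.count false ≤ N →
      g.length = b.length →
      (∀ row ∈ g, ∀ x ∈ row, PySem.Raise.InRange b.length x) →
      ∀ x : Int, PySem.Raise.InRange b.length x →
        (dfsB g x b).val.1 = ((pvRS g b [x]).ncard : Int) ∧
        pvVX (dfsB g x b).val.2 b (pvRS g b [x]) := by
    intro b hbN hg hrows x hx
    have hget0 := pvGet_eq b true x hx
    have h := dfsB.eq_def g x b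
    cases hv : b.getD (pvIx b.length x) true with
    | true =>
      have hget : PySem.List.pyGet? b x = some true := by rw [hget0, hv]
      split at h
      · rename_i heq; rw [hget] at heq; simp at heq
      · rename_i heq
        rw [h]
        have hempty : pvRS g b [x] = ∅ := pvRS_src_vis g b x hv
        refine ⟨by rw [hempty]; simp, rfl, ?_⟩
        intro i; rw [hempty]; simp
      · rename_i heq; rw [hget] at heq; simp at heq
    | false =>
      have hget : PySem.List.pyGet? b x = some false := by rw [hget0, hv]
      have hi0 : pvIx b.length x < b.length := pvGetD_lt b _ hv
      have hbset : PySem.List.pySetD b x true = b.set (pvIx b.length x) true := pvSet_eq b x hx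
      have hlenset : (b.set (pvIx b.length x) true).length = b.length := by simp
      have hcnt : (PySem.List.pySetD b x true).count false < b.count false :=
        pvCountFalseSet b x hget
      have hgin : PySem.Raise.InRange g.length x := by rw [hg]; exact hx
      have hrowget : PySem.List.pyGet? g x = some (g.getD (pvIx b.length x) []) := by
        rw [pvGet_eq g [] x hgin]
        congr 2
        rw [hg]
      have hrowmem : g.getD (pvIx b.length x) [] ∈ g := by
        have hlt : pvIx b.length x < g.length := by rw [hg]; exact hi0
        rw [List.getD_eq_getElem?_getD, List.getElem?_eq_getElem hlt]
        exact List.getElem_mem _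
      have hrowrange := hrows _ hrowmem
      split at h
      · rename_i heq; rw [hget] at heq; simp at heq
      · rename_i heq; rw [hget] at heq; simp at heq
      · rw [h]
        show (dfsBLoop g ((PySem.List.pyGet? g x).getD []) 1 (PySem.List.pySetD b x true)).val.1
              = ((pvRS g b [x]).ncard : Int) ∧
            pvVX (dfsBLoop g ((PySem.List.pyGet? g x).getD []) 1 (PySem.List.pySetD b x true)).val.2
              b (pvRS g b [x])
        rw [hrowget, hbset]
        simp only [Option.getD_some]
        rw [hbset] at hcnt
        obtain ⟨hc1, hvx1⟩ :=
          (ihN ((b.set (pvIx b.length x) true).count false)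
              (Nat.lt_of_lt_of_le hcnt hbN)).2
            ((PySem.List.pyGet? g x).getD []) (PySem.List.pySetD b x true) 1
            (by rw [hbset])
            (by rw [hbset, hlenset]; exact hg)
            (by rw [hbset]; intro r hr y hy; rw [hlenset]; exact hrows r hr y hy)
            (by
              rw [hrowget, hbset]
              intro y hy
              rw [hlenset]
              exact hrowrange y hy)
        rw [hrowget, hbset] at hc1 hvx1
        simp only [Option.getD_some] at hc1 hvx1
        have hstep : pvRS g b [x]
            = insert (pvIx b.length x)
                (pvRS g (b.set (pvIx b.length x) true) (g.getD (pvIx b.length x) [])) := by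
          have := pvRS_step g b x [] hv
          rw [List.append_nil] at this
          exact this
        have hncard : ((pvRS g b [x]).ncard : Int)
            = ((pvRS g (b.set (pvIx b.length x) true) (g.getD (pvIx b.length x) [])).ncard : Int) + 1 := by
          rw [hstep, Set.ncard_insert_of_notMem (pvRS_set_notmem g b _ hi0 _) (pvRS_finite g _ _)]
          push_cast; ring
        constructor
        · rw [hc1, hncard]
          ring
        · obtain ⟨hvl, hvi⟩ := hvx1
          constructor
          · rw [hvl, hlenset]
          · intro i
            rw [hvi i, pvSet_iff b _ hi0 i, hstep]
            simp only [Set.mem_insert_iff]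
            tauto
  refine ⟨hP, ?_⟩
  intro xs
  induction xs with
  | nil =>
    intro b c hbN hg hrows hxs
    have h := dfsBLoop.eq_def g [] c b
    simp only at h
    rw [h, pvRS_nil]
    exact ⟨by simp, rfl, by intro i; simp⟩
  | cons x xs ihxs =>
    intro b c hbN hg hrows hxs
    have h := dfsBLoop.eq_def g (x :: xs) c b
    simp only at h
    rw [h]
    obtain ⟨hd, hvx⟩ := hP b hbN hg hrows x (hxs x List.mem_cons_self)
    have hb2N : (dfsB g x b).val.2.count false ≤ N := le_trans (dfsB g x b).property.2 hbN
    have hb2len : (dfsB g x b).val.2.length = b.length := (dfsB g x b).property.1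
    obtain ⟨hc2, hvx2⟩ := ihxs (dfsB g x b).val.2 (c + (dfsB g x b).val.1) hb2N
      (by rw [hb2len]; exact hg)
      (by rw [hb2len]; exact hrows)
      (by rw [hb2len]; intro y hy; exact hxs y (List.mem_cons_of_mem x hy))
    have hdiff : pvRS g (dfsB g x b).val.2 xs = pvRS g b xs \ pvRS g b [x] :=
      pvRS_VX g b _ [x] xs hvx
    constructor
    · rw [hc2, hd, hdiff, pvRS_split g b x xs]
      ring
    · obtain ⟨hvl1, hvi1⟩ := hvx
      obtain ⟨hvl2, hvi2⟩ := hvx2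
      constructor
      · rw [hvl2, hvl1]
      · intro i
        rw [hvi2 i, hdiff, hvi1 i]
        conv_rhs => rw [pvRS_cons]
        simp only [Set.mem_union, Set.mem_diff]
        tauto

theorem pvA_visited (g : List (List Int)) (s : Int) (b : List Bool)
    (hs : PySem.Raise.InRange b.length s)
    (hvis : b.getD (pvIx b.length s) true = true) : dfs g s b = 0 := by
  unfold dfs
  have hne : ([s] : List Int) ≠ [] := by simp
  have hscrut : PySem.List.pyGet? b (([s] : List Int).getLast hne) = some true := by
    show PySem.List.pyGet? b s = some true
    rw [pvGet_eq b true s hs, hvis]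
  rw [dfsLoopA]
  rw [dif_neg hne]
  simp only [letFun]
  split
  · rename_i heq; rw [hscrut] at heq
  · show dfsLoopA g [] b 0 = 0
    rw [dfsLoopA]
    simp
  · rename_i heq; rw [hscrut] at heq; simp at heq

theorem pvB_visited (g : List (List Int)) (s : Int) (b : List Bool)
    (hs : PySem.Raise.InRange b.length s)
    (hvis : b.getD (pvIx b.length s) true = true) : dfs_alt g s b = 0 := by
  unfold dfs_alt
  have h := dfsB.eq_def g s b
  split at h
  · rw [h]
  · rw [h]
  · rename_i heq
    rw [pvGet_eq b true s hs, hvis] at heq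
    simp at heq

-- ===== VERDICT (by name: the statement is the Claim_ definition above) =====
theorem dfs_spec : Claim_equal_dfs := by
  unfold Claim_equal_dfs Spec_dfs
  intro g s b _ hpre
  obtain ⟨hs, harm⟩ := hpre
  rcases harm with hvis | ⟨hg, hrows⟩
  · rw [pvA_visited g s b hs hvis, pvB_visited g s b hs hvis]
  · unfold dfs dfs_alt
    rw [pvLoopA_eq g [s] b 0 hg hrows
      (by intro t ht; rw [List.mem_singleton] at ht; subst ht; exact hs)]
    obtain ⟨h1, _⟩ := (pvB_main g (b.count false)).1 b (Nat.le_refl _) hg hrows s hs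
    rw [h1]
    ring
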